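-- pv_equiv track=rewrite | github.com/sueszli/vector-database-benchmark | dataset/python-mutated/clinic.py | permute_right_option_groups
-- ===== SOURCE A (Python) =====
-- def permute_right_option_groups(l):
--     if False:
--         while True:
--             i = 10
--     '\n    Given [1, 2, 3], should yield:\n      ()\n      (1,)\n      (1, 2)\n      (1, 2, 3)\n    '
--     yield tuple()
--     accumulator = []
--     for group in l:
--         accumulator.extend(group)
--         yield tuple(accumulator)
-- ===== SOURCE B (Python) =====
-- def permute_right_option_groups(l):
--     # Index-based: for each prefix length i of l, recompute the i-th cumulative
--     # tuple directly from the first i groups (no running accumulator).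
--     groups = list(l)
--     for i in range(len(groups) + 1):
--         yield tuple(x for g in groups[:i] for x in g)
-- ===== Notes on version B (the rewrite author's own statement) =====
-- stated objective: alternative
-- what changed: Replaced the single accumulate-and-yield loop by an index-driven formulation: for every prefix length i in range(len(l)+1), the i-th tuple is recomputed directly as the flattening of the slice l[:i], with no running accumulator or boundary table.
import Mathlib
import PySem

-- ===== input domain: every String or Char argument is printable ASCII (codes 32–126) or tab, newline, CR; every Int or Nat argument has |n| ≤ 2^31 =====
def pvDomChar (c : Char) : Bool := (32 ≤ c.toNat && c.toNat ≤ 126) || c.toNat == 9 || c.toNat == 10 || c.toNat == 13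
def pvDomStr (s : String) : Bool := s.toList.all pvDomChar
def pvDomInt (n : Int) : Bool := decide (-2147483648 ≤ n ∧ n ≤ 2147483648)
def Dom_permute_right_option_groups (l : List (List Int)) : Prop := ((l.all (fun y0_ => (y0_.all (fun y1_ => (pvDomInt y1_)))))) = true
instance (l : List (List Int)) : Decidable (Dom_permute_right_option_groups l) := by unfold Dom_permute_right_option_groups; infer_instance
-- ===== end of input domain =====

-- B recomputes each yielded tuple directly from the prefix l[:i] of groups, one per
-- index i in range(len(l)+1), instead of A's single accumulate-and-yield loop
-- (alternative decomposition, not claimed faster). Equivalence is about the list of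
-- yielded tuples.

-- ===== PORT A =====
-- yield () first; then for each group, extend the accumulator and yield a copy of it.
def permute_right_option_groups (l : List (List Int)) : List (List Int) :=
  [] :: (l.foldl
    (fun (st : List Int × List (List Int)) group =>
      (st.1 ++ group, st.2 ++ [st.1 ++ group]))
    ([], [])).2

-- ===== PORT B =====
-- for i in range(len(groups)+1): yield the flattening of groups[:i] (i ≥ 0, so l[:i] = take i)
def permute_right_option_groups_alt (l : List (List Int)) : List (List Int) :=
  (List.range (l.length + 1)).map (fun i => (l.take i).flatten)

-- ===== PRECONDITION & SPEC =====
def Spec_permute_right_option_groups (l : List (List Int)) (out : List (List Int)) : Prop := out = permute_right_option_groups_alt l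
instance (l : List (List Int)) (out : List (List Int)) : Decidable (Spec_permute_right_option_groups l out) := by unfold Spec_permute_right_option_groups; infer_instance

-- ===== CLAIM (what is proved, stated in full; the proofs are below) =====
def Claim_equal_permute_right_option_groups : Prop := ∀ (l : List (List Int)), Dom_permute_right_option_groups l → Spec_permute_right_option_groups l (permute_right_option_groups l)

-- ===== LEMMAS AND PROOFS =====

-- reference: the non-empty cumulative prefixes starting from accumulator acc
def pvPrefs (acc : List Int) : List (List Int) → List (List Int)
  | [] => []
  | g :: t => (acc ++ g) :: pvPrefs (acc ++ g) t

theorem pvA_loop (l : List (List Int)) : ∀ (acc : List Int) (out : List (List Int)),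
    (l.foldl (fun (st : List Int × List (List Int)) group =>
        ((st.1 ++ group : List Int), st.2 ++ [st.1 ++ group])) (acc, out)).2
      = out ++ pvPrefs acc l := by
  induction l with
  | nil => intro acc out; simp [pvPrefs]
  | cons g t ih => intro acc out; simp [pvPrefs, ih]

theorem pvPrefs_eq_map (l : List (List Int)) : ∀ (acc : List Int),
    pvPrefs acc l = (List.range l.length).map (fun i => acc ++ (l.take (i + 1)).flatten) := by
  induction l with
  | nil => intro acc; simp [pvPrefs]
  | cons g t ih =>
    intro acc
    simp only [List.length_cons]
    rw [List.range_succ_eq_map]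
    simp only [pvPrefs, List.map_cons, List.map_map]
    congr 1
    · simp
    · rw [ih (acc ++ g)]
      apply List.map_congr_left
      intro i _
      simp [List.append_assoc]

-- ===== VERDICT (by name: the statement is the Claim_ definition above) =====
theorem permute_right_option_groups_spec : Claim_equal_permute_right_option_groups := by
  intro l _
  unfold Spec_permute_right_option_groups permute_right_option_groups permute_right_option_groups_alt
  rw [pvA_loop l [] [], pvPrefs_eq_map l []]
  rw [List.range_succ_eq_map]
  simp
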